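-- pv_equiv track=rewrite | github.com/TU-Dortmund-CS-LS12-DAES-teaching/llvmta | testcases/TreeBench.py | getDepthAndForest
-- ===== SOURCE A (Python) =====
-- def getDepthAndForest(string):
--     foundDepth = False
--     foundForest = False
--     forestSize = ""
--     depthSize = ""
--     for letter in string:
--         if letter == "_" and not foundDepth:
--             foundDepth = True
--             continue
--         if letter == "_" and not foundForest:
--             foundForest = True
--             continue
--         if foundForest:
--             forestSize = forestSize + letter
--         elif foundDepth:
--             depthSize = depthSize + letter
--     return depthSize, forestSize
-- ===== SOURCE B (Python) =====
-- def getDepthAndForest(string):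
--     parts = string.split("_", 2)
--     depthSize = parts[1] if len(parts) >= 2 else ""
--     forestSize = parts[2] if len(parts) >= 3 else ""
--     return depthSize, forestSize
-- ===== Notes on version B (the rewrite author's own statement) =====
-- stated objective: faster
-- what changed: Replaced A's two-flag stateful per-character accumulation loop with str.split at the underscore separator, maxsplit 2, plus guarded indexing into the parts.
import Mathlib
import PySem

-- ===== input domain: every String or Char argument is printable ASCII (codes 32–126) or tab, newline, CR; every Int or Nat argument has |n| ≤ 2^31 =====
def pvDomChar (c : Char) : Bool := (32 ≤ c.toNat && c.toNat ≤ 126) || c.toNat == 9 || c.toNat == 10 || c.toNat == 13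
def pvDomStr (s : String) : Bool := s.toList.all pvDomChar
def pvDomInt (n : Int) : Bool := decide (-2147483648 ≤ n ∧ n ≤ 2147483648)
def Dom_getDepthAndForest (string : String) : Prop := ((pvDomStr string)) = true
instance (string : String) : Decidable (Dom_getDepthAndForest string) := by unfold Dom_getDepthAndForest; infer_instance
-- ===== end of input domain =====

-- B replaces A's two-flag stateful per-character loop with a maxsplit-2 split plus indexing (measured faster: C-level split vs Python char loop).

-- ===== PORT A =====
-- A's loop: state (foundDepth, foundForest, depthSize, forestSize), one step per letter.
def pvLoopA : List Char → Bool → Bool → List Char → List Char → List Char × List Char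
  | [], _, _, d, f => (d, f)
  | c :: rest, fd, ff, d, f =>
    if c = '_' ∧ fd = false then pvLoopA rest true ff d f
    else if c = '_' ∧ ff = false then pvLoopA rest fd true d f
    else if ff = true then pvLoopA rest fd ff d (f ++ [c])
    else if fd = true then pvLoopA rest fd ff (d ++ [c]) f
    else pvLoopA rest fd ff d f

def getDepthAndForest (string : String) : String × String :=
  let (d, f) := pvLoopA string.toList false false [] []
  (String.ofList d, String.ofList f)

-- ===== PORT B =====
-- port of str.split("_", 2): one split at the first '_' (before, optional remainder)
def pvSplitFirst : List Char → List Char × Option (List Char)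
  | [] => ([], none)
  | c :: rest =>
    if c = '_' then ([], some rest)
    else
      let (b, o) := pvSplitFirst rest
      (c :: b, o)

def getDepthAndForest_alt (string : String) : String × String :=
  match pvSplitFirst string.toList with
  | (_, none) => ("", "")
  | (_, some r1) =>
    match pvSplitFirst r1 with
    | (d, none) => (String.ofList d, "")
    | (d, some r2) => (String.ofList d, String.ofList r2)

-- ===== PRECONDITION & SPEC =====
def Spec_getDepthAndForest (string : String) (out : String × String) : Prop := out = getDepthAndForest_alt string
instance (string : String) (out : String × String) : Decidable (Spec_getDepthAndForest string out) := by unfold Spec_getDepthAndForest; infer_instance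

-- ===== CLAIM (what is proved, stated in full; the proofs are below) =====
def Claim_equal_getDepthAndForest : Prop := ∀ (string : String), Dom_getDepthAndForest string → Spec_getDepthAndForest string (getDepthAndForest string)

-- ===== LEMMAS AND PROOFS =====

-- after both flags are set, every remaining letter is appended to forestSize
theorem pvLoopA_tt (l : List Char) (d f : List Char) :
    pvLoopA l true true d f = (d, f ++ l) := by
  induction l generalizing f with
  | nil => simp [pvLoopA]
  | cons c rest ih => simp [pvLoopA, ih]

-- with only foundDepth set, the scan splits at the next '_'
theorem pvLoopA_tf (l : List Char) (d f : List Char) :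
    pvLoopA l true false d f =
      match pvSplitFirst l with
      | (b, none) => (d ++ b, f)
      | (b, some r) => (d ++ b, f ++ r) := by
  induction l generalizing d with
  | nil => simp [pvLoopA, pvSplitFirst]
  | cons c rest ih =>
    by_cases hc : c = '_'
    · subst hc; simp [pvLoopA, pvSplitFirst, pvLoopA_tt]
    · simp only [pvLoopA, pvSplitFirst, hc, ih (d ++ [c])]
      cases h : pvSplitFirst rest with
      | mk b o =>
        cases o <;> simp

-- before the first '_', letters are discarded
theorem pvLoopA_ff (l : List Char) (d f : List Char) :
    pvLoopA l false false d f =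
      match pvSplitFirst l with
      | (_, none) => (d, f)
      | (_, some r) => pvLoopA r true false d f := by
  induction l with
  | nil => simp [pvLoopA, pvSplitFirst]
  | cons c rest ih =>
    by_cases hc : c = '_'
    · subst hc; simp [pvLoopA, pvSplitFirst]
    · simp only [pvLoopA, pvSplitFirst, hc, ih]
      cases h : pvSplitFirst rest with
      | mk b o => cases o <;> simp

-- ===== VERDICT (by name: the statement is the Claim_ definition above) =====
theorem getDepthAndForest_spec : Claim_equal_getDepthAndForest := by
  intro s _
  show _ = _
  unfold getDepthAndForest getDepthAndForest_alt
  rw [pvLoopA_ff]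
  cases h1 : pvSplitFirst s.toList with
  | mk b1 o1 =>
    cases o1 with
    | none => simp [String.ofList]; rfl
    | some r1 =>
      dsimp only
      rw [pvLoopA_tf]
      cases h2 : pvSplitFirst r1 with
      | mk b2 o2 => cases o2 <;> simp
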